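-- pv_equiv track=rewrite | github.com/idealHyun/coding-test | 프로그래머스/3/12987. 숫자 게임/숫자 게임.py | solution
-- ===== SOURCE A (Python) =====
-- import bisect
--
-- def solution(A, B):
--     answer = 0
--     B.sort()
--
--     for a in A:
--         i = bisect.bisect_right(B,a)
--         if i!=len(B):
--             del B[i]
--             answer+=1
--
--     return answer
-- ===== SOURCE B (Python) =====
-- def solution(A, B):
--     A2 = sorted(A)
--     B2 = sorted(B)
--     count = 0
--     j = 0
--     n = len(B2)
--     for a in A2:
--         while j < n and B2[j] <= a:
--             j += 1
--         if j < n: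
--             count += 1
--             j += 1
--     return count
-- ===== Notes on version B (the rewrite author's own statement) =====
-- stated objective: faster
-- what changed: Replaces the per-element bisect + O(n) list deletion on a mutable B (processed in A's input order) with sorting both arrays once and a single two-pointer scan; an order-invariance lemma shows the greedy count is unchanged.
import Mathlib
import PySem

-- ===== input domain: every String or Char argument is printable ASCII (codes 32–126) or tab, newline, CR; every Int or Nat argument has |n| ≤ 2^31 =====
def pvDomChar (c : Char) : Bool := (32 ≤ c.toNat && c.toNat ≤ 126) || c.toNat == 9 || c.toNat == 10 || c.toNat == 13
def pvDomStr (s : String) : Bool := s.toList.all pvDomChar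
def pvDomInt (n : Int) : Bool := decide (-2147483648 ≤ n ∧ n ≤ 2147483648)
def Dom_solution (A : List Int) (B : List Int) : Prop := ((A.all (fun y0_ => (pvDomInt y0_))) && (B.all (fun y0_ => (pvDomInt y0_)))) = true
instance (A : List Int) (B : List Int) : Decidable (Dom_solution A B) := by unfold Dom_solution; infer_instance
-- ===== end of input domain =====

-- B sorts both arrays once and counts matches with a two-pointer scan instead of A's
-- repeated bisect + list deletion; Python A mutates its argument B (sort + del) — the
-- equivalence proved here is about the RETURN value only.

-- ===== PORT A =====
def solution (A : List Int) (B : List Int) : Int :=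
  (A.foldl (fun (st : List Int × Int) a =>
      let i := PySem.List.bisectRight st.1 a
      if i ≠ st.1.length then (st.1.eraseIdx i, st.2 + 1) else st)
    (PySem.List.sorted B (fun x => x), (0 : Int))).2

-- ===== PORT B =====
-- the 'for a in A2 / while j < n and B2[j] <= a' loop, as recursion on sorted A with the
-- remaining suffix of sorted B standing for index j
def twoPtr : List Int → List Int → Int
  | [], _ => 0
  | a :: as, bs =>
    match bs.dropWhile (fun b => decide (b ≤ a)) with
    | [] => 0
    | _ :: bs' => 1 + twoPtr as bs'

def solution_alt (A : List Int) (B : List Int) : Int :=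
  twoPtr (PySem.List.sorted A (fun x => x)) (PySem.List.sorted B (fun x => x))

-- ===== PRECONDITION & SPEC =====
def Spec_solution (A : List Int) (B : List Int) (out : Int) : Prop := out = solution_alt A B
instance (A : List Int) (B : List Int) (out : Int) : Decidable (Spec_solution A B out) := by unfold Spec_solution; infer_instance

-- ===== CLAIM (what is proved, stated in full; the proofs are below) =====
def Claim_equal_solution : Prop := ∀ (A : List Int) (B : List Int), Dom_solution A B → Spec_solution A B (solution A B)

-- ===== LEMMAS AND PROOFS =====

-- abstract form of A's loop body on the sorted list: remove the first element > a
def runStep (a : Int) (bs : List Int) : Int × List Int :=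
  match bs.dropWhile (fun b => decide (b ≤ a)) with
  | [] => (0, bs)
  | _ :: d => (1, bs.takeWhile (fun b => decide (b ≤ a)) ++ d)

def run : List Int → List Int → Int × List Int
  | [], bs => (0, bs)
  | a :: as, bs =>
    let s := runStep a bs
    let r := run as s.2
    (s.1 + r.1, r.2)

theorem runStep_sublist (a : Int) (bs : List Int) : (runStep a bs).2.Sublist bs := by
  unfold runStep
  cases hd : bs.dropWhile (fun b => decide (b ≤ a)) with
  | nil => exact List.Sublist.refl bs
  | cons x d =>
    simp only
    conv_rhs => rw [← List.takeWhile_append_dropWhile (p := fun b => decide (b ≤ a)) (l := bs), hd]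
    exact List.Sublist.append_left (List.sublist_cons_self x d) _

theorem runStep_pairwise (a : Int) (bs : List Int)
    (h : bs.Pairwise (· ≤ ·)) : (runStep a bs).2.Pairwise (· ≤ ·) :=
  h.sublist (runStep_sublist a bs)

theorem runStep_cons_le {c a : Int} (cs : List Int) (hca : c ≤ a) :
    runStep a (c :: cs) = ((runStep a cs).1, c :: (runStep a cs).2) := by
  unfold runStep
  simp only [List.dropWhile_cons, List.takeWhile_cons, hca, decide_true, if_true]
  cases hd : cs.dropWhile (fun b => decide (b ≤ a)) <;> simp

theorem runStep_cons_gt {c a : Int} (cs : List Int) (hca : ¬ c ≤ a) :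
    runStep a (c :: cs) = (1, cs) := by
  unfold runStep
  simp [hca]

theorem runStep_comm (a b : Int) (bs : List Int) (hab : a ≤ b)
    (h : bs.Pairwise (· ≤ ·)) :
    (runStep a bs).1 + (runStep b (runStep a bs).2).1
      = (runStep b bs).1 + (runStep a (runStep b bs).2).1
    ∧ (runStep b (runStep a bs).2).2 = (runStep a (runStep b bs).2).2 := by
  induction bs with
  | nil => simp [runStep]
  | cons c cs ih =>
    rcases List.pairwise_cons.mp h with ⟨hc, hcs⟩
    by_cases h1 : c ≤ a
    · have h2 : c ≤ b := le_trans h1 hab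
      rw [runStep_cons_le cs h1, runStep_cons_le cs h2]
      simp only
      rw [runStep_cons_le _ h2, runStep_cons_le _ h1]
      rcases ih hcs with ⟨hcnt, hfin⟩
      exact ⟨hcnt, by simp [hfin]⟩
    · by_cases h2 : c ≤ b
      · rw [runStep_cons_gt cs h1, runStep_cons_le cs h2]
        simp only
        rw [runStep_cons_gt _ h1]
        exact ⟨by omega, rfl⟩
      · -- b < c : everything in cs is > b ≥ a, both steps behave identically on cs
        rw [runStep_cons_gt cs h1, runStep_cons_gt cs h2]
        simp only
        cases cs with
        | nil => simp [runStep]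
        | cons x xs =>
          have hxc : c ≤ x := hc x (by simp)
          have hxb : ¬ x ≤ b := by omega
          have hxa : ¬ x ≤ a := by omega
          rw [runStep_cons_gt xs hxa, runStep_cons_gt xs hxb]
          simp

theorem run_swap (a b : Int) (l : List Int) (bs : List Int)
    (h : bs.Pairwise (· ≤ ·)) : run (a :: b :: l) bs = run (b :: a :: l) bs := by
  have hcomm : ∀ (x y : Int), x ≤ y →
      run (x :: y :: l) bs = run (y :: x :: l) bs := by
    intro x y hxy
    rcases runStep_comm x y bs hxy h with ⟨hcnt, hfin⟩
    show (_ , _) = (_ , _)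
    simp only [run, hfin, Prod.mk.injEq, and_true]
    omega
  rcases le_total a b with hab | hba
  · exact hcomm a b hab
  · exact (hcomm b a hba).symm

theorem run_perm {l l' : List Int} (hp : l.Perm l') :
    ∀ bs : List Int, bs.Pairwise (· ≤ ·) → run l bs = run l' bs := by
  induction hp with
  | nil => intro bs _; rfl
  | cons a _ ih =>
    intro bs hbs
    simp only [run]
    rw [ih _ (runStep_pairwise a bs hbs)]
  | swap x y l => intro bs hbs; exact run_swap y x l bs hbs
  | trans h12 _ ih1 ih2 =>
    intro bs hbs
    rw [ih1 bs hbs, ih2 bs hbs]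

-- bisect_right on a sorted list is the length of the ≤-prefix
theorem takeWhile_getElem_prop {α : Type} (p : α → Bool) :
    ∀ (l : List α) (j : Nat) (hj : j < l.length),
      j < (l.takeWhile p).length → p (l[j]) = true := by
  intro l
  induction l with
  | nil => intro j hj; simp at hj
  | cons x xs ih =>
    intro j hj hlt
    by_cases hx : p x = true
    · cases j with
      | zero => simpa using hx
      | succ k =>
        simp only [List.takeWhile_cons, hx, if_true, List.length_cons] at hlt
        exact ih k (by simpa using hj) (by omega)
    · simp [hx] at hlt

theorem takeWhile_getElem_not {α : Type} (p : α → Bool) :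
    ∀ (l : List α) (h : (l.takeWhile p).length < l.length),
      ¬ p (l[(l.takeWhile p).length]'h) = true := by
  intro l
  induction l with
  | nil => intro h; simp at h
  | cons x xs ih =>
    intro h
    by_cases hx : p x = true
    · simp only [List.takeWhile_cons, hx, if_true, List.length_cons] at h ⊢
      simpa using ih (by omega)
    · simp [hx]

theorem bisect_eq_takeWhile (bs : List Int) (a : Int) (h : bs.Pairwise (· ≤ ·)) :
    PySem.List.bisectRight bs a = (bs.takeWhile (fun b => decide (b ≤ a))).length := by
  rcases PySem.List.bisectRight_spec bs a h with ⟨hle, h1, h2⟩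
  have htlen : (bs.takeWhile (fun b => decide (b ≤ a))).length ≤ bs.length :=
    (bs.takeWhile_sublist _).length_le
  rcases Nat.lt_trichotomy (PySem.List.bisectRight bs a)
      ((bs.takeWhile (fun b => decide (b ≤ a))).length) with hlt | heq | hgt
  · exfalso
    have hib : PySem.List.bisectRight bs a < bs.length := lt_of_lt_of_le hlt htlen
    have h3 := takeWhile_getElem_prop (fun b => decide (b ≤ a)) bs _ hib hlt
    have h4 := h2 _ hib le_rfl
    simp at h3; omega
  · exact heq
  · exfalso
    have htb : (bs.takeWhile (fun b => decide (b ≤ a))).length < bs.length :=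
      lt_of_lt_of_le hgt hle
    have h3 := h1 _ htb hgt
    have h4 := takeWhile_getElem_not (fun b => decide (b ≤ a)) bs htb
    simp at h4; omega

theorem eraseIdx_append_cons {α : Type} :
    ∀ (t : List α) (x : α) (d : List α), (t ++ x :: d).eraseIdx t.length = t ++ d := by
  intro t x d
  induction t with
  | nil => simp
  | cons y ys ih => simp [ih]

-- A's loop body equals runStep (on a sorted state)
theorem body_eq_runStep (a : Int) (bs : List Int) (ans : Int) (h : bs.Pairwise (· ≤ ·)) :
    (let i := PySem.List.bisectRight bs a
     if i ≠ bs.length then (bs.eraseIdx i, ans + 1) else (bs, ans))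
    = ((runStep a bs).2, ans + (runStep a bs).1) := by
  rw [bisect_eq_takeWhile bs a h]
  have hsplit := List.takeWhile_append_dropWhile (p := fun b => decide (b ≤ a)) (l := bs)
  cases hd : bs.dropWhile (fun b => decide (b ≤ a)) with
  | nil =>
    have hlen : (bs.takeWhile (fun b => decide (b ≤ a))).length = bs.length := by
      conv_rhs => rw [← hsplit, hd]
      simp
    simp [runStep, hd, hlen]
  | cons x d =>
    have hlen : (bs.takeWhile (fun b => decide (b ≤ a))).length ≠ bs.length := by
      conv_rhs => rw [← hsplit, hd]
      simp [List.length_append]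
    have hsplit' : bs.takeWhile (fun b => decide (b ≤ a)) ++ x :: d = bs := by
      rw [← hd]; exact hsplit
    have herase : bs.eraseIdx (bs.takeWhile (fun b => decide (b ≤ a))).length
        = bs.takeWhile (fun b => decide (b ≤ a)) ++ d := by
      have h5 := eraseIdx_append_cons (bs.takeWhile (fun b => decide (b ≤ a))) x d
      rw [hsplit'] at h5
      exact h5
    simp [runStep, hd, hlen, herase]

theorem foldl_eq_run : ∀ (as : List Int) (bs : List Int) (ans : Int),
    bs.Pairwise (· ≤ ·) →
    (as.foldl (fun (st : List Int × Int) a =>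
        let i := PySem.List.bisectRight st.1 a
        if i ≠ st.1.length then (st.1.eraseIdx i, st.2 + 1) else st) (bs, ans))
      = ((run as bs).2, ans + (run as bs).1) := by
  intro as
  induction as with
  | nil => intro bs ans _; simp [run]
  | cons a as ih =>
    intro bs ans hbs
    rw [List.foldl_cons]
    have hb := body_eq_runStep a bs ans hbs
    simp only at hb
    rw [hb, ih _ _ (runStep_pairwise a bs hbs)]
    simp only [run, Prod.mk.injEq, true_and]
    omega

theorem run_none : ∀ (as : List Int) (bs : List Int) (a : Int),
    (∀ b ∈ bs, b ≤ a) → (∀ a' ∈ as, a ≤ a') → run as bs = (0, bs) := by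
  intro as
  induction as with
  | nil => intro bs a _ _; rfl
  | cons a' as ih =>
    intro bs a hb ha
    have hd : bs.dropWhile (fun b => decide (b ≤ a')) = [] := by
      rw [List.dropWhile_eq_nil_iff]
      intro x hx
      have := hb x hx
      have := ha a' (by simp)
      simp; omega
    simp only [run, runStep, hd]
    rw [ih bs a hb (fun x hx => ha x (by simp [hx]))]
    simp

theorem run_prefix : ∀ (as : List Int) (t d : List Int),
    (∀ b ∈ t, ∀ a' ∈ as, b ≤ a') →
    run as (t ++ d) = ((run as d).1, t ++ (run as d).2) := by
  intro as
  induction as with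
  | nil => intro t d _; rfl
  | cons a as ih =>
    intro t d ht
    have htall : ∀ b ∈ t, (fun b => decide (b ≤ a)) b = true := by
      intro b hb; simpa using ht b hb a (by simp)
    have hdt : t.dropWhile (fun b => decide (b ≤ a)) = [] :=
      List.dropWhile_eq_nil_iff.mpr htall
    have htt : t.takeWhile (fun b => decide (b ≤ a)) = t := by
      have := List.takeWhile_append_dropWhile (p := fun b => decide (b ≤ a)) (l := t)
      rw [hdt] at this; simpa using this
    have hdw : (t ++ d).dropWhile (fun b => decide (b ≤ a))
        = d.dropWhile (fun b => decide (b ≤ a)) := by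
      rw [List.dropWhile_append, hdt]; simp
    have htw : (t ++ d).takeWhile (fun b => decide (b ≤ a))
        = t ++ d.takeWhile (fun b => decide (b ≤ a)) := by
      rw [List.takeWhile_append]
      simp [htt]
    have ht' : ∀ b ∈ t, ∀ a' ∈ as, b ≤ a' := by
      intro b hb a' ha'; exact ht b hb a' (by simp [ha'])
    cases hd : d.dropWhile (fun b => decide (b ≤ a)) with
    | nil =>
      simp only [run, runStep, hdw, hd]
      rw [ih t d ht']
    | cons x d' =>
      simp only [run, runStep, hdw, hd, htw]
      rw [List.append_assoc, ih t _ ht']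

theorem run_eq_twoPtr : ∀ (as bs : List Int),
    as.Pairwise (· ≤ ·) → bs.Pairwise (· ≤ ·) → (run as bs).1 = twoPtr as bs := by
  intro as
  induction as with
  | nil => intro bs _ _; rfl
  | cons a as ih =>
    intro bs has hbs
    rcases List.pairwise_cons.mp has with ⟨ha, has'⟩
    cases hd : bs.dropWhile (fun b => decide (b ≤ a)) with
    | nil =>
      have hball : ∀ b ∈ bs, b ≤ a := by
        intro b hb
        have := List.dropWhile_eq_nil_iff.mp hd b hb
        simpa using this
      simp only [run, runStep, hd, twoPtr]
      rw [run_none as bs a hball ha]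
      simp
    | cons x d =>
      have hsplit := List.takeWhile_append_dropWhile (p := fun b => decide (b ≤ a)) (l := bs)
      have hdsub : d.Sublist bs := by
        have : (x :: d).Sublist bs := hd ▸ List.dropWhile_sublist _
        exact (List.sublist_cons_self x d).trans this
      have htpre : ∀ b ∈ bs.takeWhile (fun b => decide (b ≤ a)), ∀ a' ∈ as, b ≤ a' := by
        intro b hb a' ha'
        have hba : b ≤ a := by
          have := List.mem_takeWhile_imp hb
          simpa using this
        exact le_trans hba (ha a' ha')
      simp only [run, runStep, hd, twoPtr]
      rw [run_prefix as _ d htpre]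
      simp only
      rw [ih d has' (hbs.sublist hdsub)]

theorem sorted_pairwise_id (xs : List Int) :
    (PySem.List.sorted xs (fun x => x)).Pairwise (· ≤ ·) := by
  have := PySem.List.sorted_pairwise xs (fun x : Int => x)
  simpa using this

-- ===== VERDICT (by name: the statement is the Claim_ definition above) =====
theorem solution_spec : Claim_equal_solution := by
  intro A B _
  unfold Spec_solution solution solution_alt
  rw [foldl_eq_run A _ 0 (sorted_pairwise_id B)]
  simp only [Int.zero_add]
  rw [run_perm ((PySem.List.sorted_perm A (fun x => x) false).symm) _ (sorted_pairwise_id B)]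
  exact run_eq_twoPtr _ _ (sorted_pairwise_id A) (sorted_pairwise_id B)
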